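-- pv_equiv track=rewrite | github.com/Purefekt/leetcode | 861. Score After Flipping Matrix/greedy.py | matrixScore
-- ===== SOURCE A (Python) =====
-- from typing import List
--
-- def matrixScore(grid: List[List[int]]) -> int:
--
--     m = len(grid)
--     n = len(grid[0])
--
--     # flip each row where the first num is 0
--     for i in range(m):
--         if grid[i][0] == 0:
--             for j in range(n):
--                 grid[i][j] = 1 if grid[i][j] == 0 else 0
--
--     # flip each column where the number of 0s in that column > number of 1s
--     for j in range(n):
--         num_zeros = 0
--         num_ones = 0
--         for i in range(m):
--             if grid[i][j] == 0:
--                 num_zeros += 1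
--             else:
--                 num_ones += 1
--         if num_zeros > num_ones:
--             for i in range(m):
--                 grid[i][j] = 1 if grid[i][j] == 0 else 0
--
--     def convert_to_int(bin_arr):
--         res = 0
--         power = 0
--         for j in range(len(bin_arr)-1, -1, -1):
--             if bin_arr[j] == 1:
--                 res += 2**power
--             power += 1
--         return res
--
--     output = 0
--     for row in grid:
--         output += convert_to_int(row)
--
--     return output
-- ===== SOURCE B (Python) =====
-- from typing import List
--
-- def matrixScore(grid: List[List[int]]) -> int:
--     # Score the grid column by column, never building the flipped matrix:
--     # a cell's value after the row-flip phase is computed on the fly, each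
--     # column is counted once to decide its flip, and the winning count is
--     # shifted straight into the total.  The input is not mutated.
--     m = len(grid)
--     n = len(grid[0])
--     total = 0
--     for j in range(n):
--         e = [(1 if row[j] == 0 else 0) if row[0] == 0 else row[j] for row in grid]
--         zeros = e.count(0)
--         cnt = zeros if 2 * zeros > m else e.count(1)
--         total += cnt << (n - 1 - j)
--     return total
-- ===== Notes on version B (the rewrite author's own statement) =====
-- stated objective: alternative
-- what changed: B scores the grid column by column in a single loop (compute the column's post-row-flip values on the fly, count them once to decide the column flip, shift the winning count into the total) instead of A's three row-major mutation passes (flip rows in place, flip majority-zero columns in place, then convert every row back to an integer with a power loop); B never mutates grid while A does, so the equivalence is about the return value. …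
-- outside the precondition, e.g. on matrixScore([[1], [1, 1]]): A returns 4, B returns 2
import Mathlib
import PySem

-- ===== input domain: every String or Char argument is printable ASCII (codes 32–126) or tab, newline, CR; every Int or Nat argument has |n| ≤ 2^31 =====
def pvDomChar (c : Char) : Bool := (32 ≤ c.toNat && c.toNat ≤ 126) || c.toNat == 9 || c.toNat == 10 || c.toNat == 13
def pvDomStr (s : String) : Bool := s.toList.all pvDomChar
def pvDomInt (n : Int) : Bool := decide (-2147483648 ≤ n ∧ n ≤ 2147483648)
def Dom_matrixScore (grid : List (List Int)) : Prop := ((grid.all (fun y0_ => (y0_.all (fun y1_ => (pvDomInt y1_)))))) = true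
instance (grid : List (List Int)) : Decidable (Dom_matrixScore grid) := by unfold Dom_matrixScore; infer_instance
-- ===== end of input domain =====

-- B computes the score by a per-column contribution formula (no flipping, no binary
-- conversion); A mutates grid in place, so the equivalence proved here is about the
-- RETURN value only (B leaves grid unchanged).

-- ===== PORT A =====
def pvFlip (v : Int) : Int := if v = 0 then 1 else 0

-- row-flip phase: for each row with first entry 0, flip its first n entries
def rowFlipA (n : Nat) (row : List Int) : List Int :=
  if row.getD 0 0 = 0 then row.mapIdx (fun j v => if j < n then pvFlip v else v) else row

-- the num_zeros / num_ones loop for column j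
def colCounts (g : List (List Int)) (j : Nat) : Int × Int :=
  g.foldl (fun p row => if row.getD j 0 = 0 then (p.1 + 1, p.2) else (p.1, p.2 + 1)) (0, 0)

-- one iteration of the column loop: count, then flip column j if zeros > ones
def phase2step (g : List (List Int)) (j : Nat) : List (List Int) :=
  let c := colCounts g j
  if c.1 > c.2 then g.map (fun row => row.set j (pvFlip (row.getD j 0))) else g

-- convert_to_int: walk the row from the back, adding 2^power for entries equal to 1
def convertA (row : List Int) : Int :=
  (row.reverse.foldl (fun (p : Int × Nat) v => (p.1 + (if v = 1 then (2:Int) ^ p.2 else 0), p.2 + 1))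
    ((0 : Int), (0 : Nat))).1

def matrixScore (grid : List (List Int)) : Int :=
  let n := (grid.headD []).length
  let g1 := grid.map (rowFlipA n)
  let g2 := (List.range n).foldl phase2step g1
  g2.foldl (fun acc row => acc + convertA row) 0

-- ===== PORT B =====
def matrixScore_alt (grid : List (List Int)) : Int :=
  let m := grid.length
  let n := (grid.headD []).length
  (List.range n).foldl (fun total j =>
    let e := grid.map (fun row =>
      if row.getD 0 0 = 0 then (if row.getD j 0 = 0 then (1:Int) else 0) else row.getD j 0)
    let zeros := e.count 0
    let cnt := if 2 * zeros > m then zeros else e.count 1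
    total + (cnt : Int) * 2 ^ (n - 1 - j)) 0

-- ===== PRECONDITION & SPEC =====
-- Pre_ excludes the empty grid and non-rectangular grids: A raises IndexError when a
-- row is shorter than the first (or the first row is empty), and when a row is longer
-- A's score of the trailing cells (which no flip ever reaches) is an accident of
-- converting each whole row.
def Pre_matrixScore (grid : List (List Int)) : Prop :=
  grid ≠ [] ∧ 0 < (grid.headD []).length ∧
    ∀ row ∈ grid, row.length = (grid.headD []).length
instance (grid : List (List Int)) : Decidable (Pre_matrixScore grid) := by
  unfold Pre_matrixScore; infer_instance

def pvWitness_matrixScore : List (List Int) := [[0,0,1,1],[1,0,1,0],[1,1,0,0]]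

def Spec_matrixScore (grid : List (List Int)) (out : Int) : Prop := out = matrixScore_alt grid
instance (grid : List (List Int)) (out : Int) : Decidable (Spec_matrixScore grid out) := by
  unfold Spec_matrixScore; infer_instance

-- ===== CLAIM (what is proved, stated in full; the proofs are below) =====
def Claim_equal_matrixScore : Prop :=
  ∀ (grid : List (List Int)), Dom_matrixScore grid → Pre_matrixScore grid →
    Spec_matrixScore grid (matrixScore grid)

-- ===== LEMMAS AND PROOFS =====

-- value of cell j after the row-flip phase
def effB (row : List Int) (j : Nat) : Int :=
  if row.getD 0 0 = 0 then (if row.getD j 0 = 0 then 1 else 0) else row.getD j 0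

-- number of rows whose column-j entry is 0
def Zc (g : List (List Int)) (j : Nat) : Nat :=
  g.countP (fun row => decide (row.getD j 0 = 0))

-- the column flip applied to one row
def setFlip (j : Nat) (row : List Int) : List Int := row.set j (pvFlip (row.getD j 0))

theorem pvFlip_eq_one (v : Int) : (pvFlip v = 1) ↔ (v = 0) := by
  unfold pvFlip; split_ifs with h <;> simp [h]

theorem rowFlipA_length (n : Nat) (row : List Int) : (rowFlipA n row).length = row.length := by
  unfold rowFlipA; split_ifs <;> simp

theorem rowFlipA_getElem (n : Nat) (row : List Int) (j : Nat) (h : j < (rowFlipA n row).length) :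
    (rowFlipA n row)[j] = if j < n then effB row j else row.getD j 0 := by
  have hj : j < row.length := by rw [rowFlipA_length] at h; exact h
  have hgd : row.getD j 0 = row[j] := List.getD_eq_getElem _ _ hj
  unfold rowFlipA effB pvFlip
  by_cases h0 : row.getD 0 0 = 0
  · simp only [h0, if_true, List.getElem_mapIdx, hgd]
  · simp only [h0, if_false, hgd]
    by_cases hn : j < n <;> simp [hn]

theorem colCounts_fold (g : List (List Int)) (j : Nat) : ∀ (a b : Int),
    g.foldl (fun p row => if row.getD j 0 = 0 then (p.1 + 1, p.2) else (p.1, p.2 + 1)) (a, b)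
      = (a + (Zc g j : Int), b + ((g.length - Zc g j : Nat) : Int)) := by
  induction g with
  | nil => intro a b; simp [Zc]
  | cons r g ih =>
    intro a b
    have hle : Zc g j ≤ g.length := List.countP_le_length
    by_cases h : r.getD j 0 = 0
    · have hz : Zc (r :: g) j = Zc g j + 1 := by
        simp [Zc, List.countP_cons, List.getD] at h ⊢; simp [h]
      simp only [List.foldl_cons, if_pos h]
      rw [ih, hz]
      simp only [List.length_cons, Prod.mk.injEq]
      constructor <;> first | trivial | omega
    · have hz : Zc (r :: g) j = Zc g j := by
        simp [Zc, List.countP_cons, List.getD] at h ⊢; simp [h]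
      simp only [List.foldl_cons, if_neg h]
      rw [ih, hz]
      simp only [List.length_cons, Prod.mk.injEq]
      constructor <;> first | trivial | omega

theorem phase2step_eq (g : List (List Int)) (j : Nat) :
    phase2step g j = if 2 * Zc g j > g.length then g.map (setFlip j) else g := by
  have h : colCounts g j = ((Zc g j : Int), ((g.length - Zc g j : Nat) : Int)) := by
    unfold colCounts; rw [colCounts_fold]; simp
  have hle : Zc g j ≤ g.length := List.countP_le_length
  unfold phase2step setFlip
  rw [h]
  by_cases h2 : 2 * Zc g j > g.length
  · rw [if_pos h2, if_pos (by omega : ((Zc g j : Int)) > (((g.length - Zc g j : Nat)) : Int))]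
  · rw [if_neg h2, if_neg (by omega : ¬ ((Zc g j : Int)) > (((g.length - Zc g j : Nat)) : Int))]

theorem Zc_map_setFlip (g : List (List Int)) (j k : Nat) (hjk : j ≠ k) :
    Zc (g.map (setFlip j)) k = Zc g k := by
  unfold Zc
  rw [List.countP_map]
  apply List.countP_congr
  intro row _
  simp only [Function.comp, setFlip, decide_eq_true_eq]
  have : (row.set j (pvFlip (row.getD j 0))).getD k 0 = row.getD k 0 := by
    simp [List.getD, List.getElem?_set_ne hjk]
  rw [this]

theorem phase2_foldl (js : List Nat) : ∀ (g : List (List Int)), js.Nodup →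
    (∀ row ∈ g, ∀ j ∈ js, j < row.length) →
    js.foldl phase2step g
      = g.map (fun row => row.mapIdx (fun j v =>
          if j ∈ js ∧ 2 * Zc g j > g.length then pvFlip v else v)) := by
  induction js with
  | nil =>
    intro g _ _
    simp only [List.foldl_nil, List.not_mem_nil, false_and, if_false]
    rw [show (fun (row : List Int) => row.mapIdx (fun _ v => v)) = (fun row => row) by
      funext row
      apply List.ext_getElem (by simp)
      intro i h1 h2
      simp [List.getElem_mapIdx]]
    simp
  | cons j js ih =>
    intro g hnd hlen
    have hjs : j ∉ js := (List.nodup_cons.mp hnd).1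
    have hnd' : js.Nodup := (List.nodup_cons.mp hnd).2
    simp only [List.foldl_cons]
    rw [phase2step_eq]
    by_cases hdec : 2 * Zc g j > g.length
    · rw [if_pos hdec]
      rw [ih (g.map (setFlip j)) hnd' (by
        intro row hrow k hk
        obtain ⟨row0, hrow0, rfl⟩ := List.mem_map.mp hrow
        simpa [setFlip] using hlen row0 hrow0 k (List.mem_cons_of_mem _ hk))]
      rw [List.map_map]
      apply List.map_congr_left
      intro row hrow
      simp only [Function.comp]
      have hjlen : j < row.length := hlen row hrow j (by simp)
      apply List.ext_getElem (by simp [setFlip])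
      intro k h1 h2
      have hklen : k < row.length := by simpa using h2
      simp only [List.getElem_mapIdx]
      by_cases hkj : k = j
      · subst hkj
        rw [if_neg (by rintro ⟨h, _⟩; exact hjs h)]
        have hs : (setFlip k row)[k]'(by simpa [setFlip] using hklen)
            = pvFlip (row.getD k 0) := by
          simp [setFlip]
        rw [hs, if_pos ⟨by simp, hdec⟩, List.getD_eq_getElem _ _ hklen]
      · have hs : (setFlip j row)[k]'(by simpa [setFlip] using hklen) = row[k] := by
          simp [setFlip, Ne.symm hkj]
        rw [hs]
        simp only [List.length_map, Zc_map_setFlip g j k (Ne.symm hkj)]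
        exact if_congr (by simp [List.mem_cons, hkj]) rfl rfl
    · rw [if_neg hdec]
      rw [ih g hnd' (fun row hrow k hk => hlen row hrow k (List.mem_cons_of_mem _ hk))]
      apply List.map_congr_left
      intro row hrow
      apply List.ext_getElem (by simp)
      intro k h1 h2
      simp only [List.getElem_mapIdx]
      by_cases hkj : k = j
      · subst hkj
        rw [if_neg (by rintro ⟨_, h⟩; exact hdec h), if_neg (by rintro ⟨_, h⟩; exact hdec h)]
      · exact if_congr (by simp [List.mem_cons, hkj]) rfl rfl

theorem convFold (l : List Int) : ∀ (a : Int) (p : Nat),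
    l.foldl (fun (q : Int × Nat) v => (q.1 + (if v = 1 then (2:Int) ^ q.2 else 0), q.2 + 1)) (a, p)
      = (a + ∑ i ∈ Finset.range l.length, (if l.getD i 0 = 1 then (2:Int) ^ (p + i) else 0),
         p + l.length) := by
  induction l with
  | nil => intro a p; simp
  | cons v l ih =>
    intro a p
    simp only [List.foldl_cons, List.length_cons]
    rw [ih]
    simp only [Prod.mk.injEq]
    refine ⟨?_, by omega⟩
    rw [Finset.sum_range_succ' (fun i => if (v :: l).getD i 0 = 1 then (2:Int) ^ (p + i) else 0)]
    have h0 : (v :: l).getD 0 0 = v := rfl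
    have hs : ∀ i, (v :: l).getD (i + 1) 0 = l.getD i 0 := fun i => rfl
    simp only [h0, hs, Nat.add_zero]
    have hcg : ∀ i ∈ Finset.range l.length,
        (if l.getD i 0 = 1 then (2:Int) ^ (p + (i + 1)) else 0)
          = (if l.getD i 0 = 1 then (2:Int) ^ ((p + 1) + i) else 0) := by
      intro i _
      rw [show p + (i + 1) = (p + 1) + i by omega]
    rw [Finset.sum_congr rfl hcg]
    ring

theorem convertA_eq (row : List Int) :
    convertA row = ∑ j ∈ Finset.range row.length,
      (if row.getD j 0 = 1 then (2:Int) ^ (row.length - 1 - j) else 0) := by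
  unfold convertA
  rw [convFold]
  simp only [List.length_reverse, zero_add]
  rw [← Finset.sum_range_reflect
    (fun j => if row.getD j 0 = 1 then (2:Int) ^ (row.length - 1 - j) else 0) row.length]
  apply Finset.sum_congr rfl
  intro i hi
  have hi' : i < row.length := Finset.mem_range.mp hi
  have h1 : row.reverse.getD i 0 = row.getD (row.length - 1 - i) 0 := by
    rw [List.getD_eq_getElem _ _ (by simpa using hi'),
        List.getD_eq_getElem _ _ (by omega), List.getElem_reverse]
  rw [h1]
  congr 2
  omega

-- generic: a foldl that only adds equals the sum of the mapped list
theorem foldl_add_eq_sum {α : Type} (l : List α) (f : α → Int) : ∀ (a : Int),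
    l.foldl (fun acc x => acc + f x) a = a + (l.map f).sum := by
  induction l with
  | nil => intro a; simp
  | cons x l ih => intro a; simp only [List.foldl_cons, List.map_cons, List.sum_cons]; rw [ih]; ring

-- sum over range' as a Finset sum
theorem sum_map_range' (f : Nat → Int) : ∀ (k s : Nat),
    ((List.range' s k).map f).sum = ∑ i ∈ Finset.range k, f (s + i) := by
  intro k
  induction k with
  | zero => intro s; simp
  | succ k ih =>
    intro s
    rw [List.range'_succ]
    simp only [List.map_cons, List.sum_cons, ih (s + 1)]
    rw [Finset.sum_range_succ' (fun i => f (s + i))]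
    have : ∀ i, f (s + (i + 1)) = f ((s + 1) + i) := by intro i; congr 1; omega
    simp only [this, Nat.add_zero]
    ring

-- swap a list sum with a Finset sum
theorem sum_map_sum {α : Type} (l : List α) (n : Nat) (h : α → Nat → Int) :
    (l.map (fun x => ∑ j ∈ Finset.range n, h x j)).sum
      = ∑ j ∈ Finset.range n, (l.map (fun x => h x j)).sum := by
  induction l with
  | nil => simp
  | cons x l ih =>
    simp only [List.map_cons, List.sum_cons, ih]
    rw [← Finset.sum_add_distrib]

-- a sum of weighted indicators is a count times the weight
theorem sum_map_ite_count {α : Type} (l : List α) (p : α → Prop) [DecidablePred p] (w : Int) :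
    (l.map (fun x => if p x then w else 0)).sum
      = (l.countP (fun x => decide (p x)) : Int) * w := by
  induction l with
  | nil => simp
  | cons x l ih =>
    simp only [List.map_cons, List.sum_cons, ih, List.countP_cons]
    by_cases h : p x
    · simp [h]
      ring
    · simp [h]

theorem Zc_g1 (grid : List (List Int)) (n j : Nat) (hj : j < n)
    (hlen : ∀ row ∈ grid, n ≤ row.length) :
    Zc (grid.map (rowFlipA n)) j = grid.countP (fun row => decide (effB row j = 0)) := by
  unfold Zc
  rw [List.countP_map]
  apply List.countP_congr
  intro row hrow
  have hjr : j < row.length := lt_of_lt_of_le hj (hlen row hrow)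
  have hjr' : j < (rowFlipA n row).length := by rw [rowFlipA_length]; exact hjr
  simp only [Function.comp_apply, decide_eq_true_eq]
  rw [List.getD_eq_getElem _ 0 hjr', rowFlipA_getElem, if_pos hj]

-- the final cell (row, j) of A's grid, for j < n
theorem final_getD (grid : List (List Int)) (row : List Int) (n j : Nat)
    (hlen : row.length = n) (hj : j < n) :
    ((rowFlipA n row).mapIdx (fun k v =>
        if k ∈ List.range n ∧ 2 * Zc (grid.map (rowFlipA n)) k > (grid.map (rowFlipA n)).length
        then pvFlip v else v)).getD j 0
      = (if 2 * Zc (grid.map (rowFlipA n)) j > grid.length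
         then pvFlip (effB row j) else effB row j) := by
  have hjr : j < row.length := by omega
  have hrf : j < (rowFlipA n row).length := by rw [rowFlipA_length]; omega
  rw [List.getD_eq_getElem _ _ (by simpa using hrf)]
  simp only [List.getElem_mapIdx, List.length_map]
  rw [rowFlipA_getElem _ _ _ hrf, if_pos hj]
  by_cases hd : 2 * Zc (grid.map (rowFlipA n)) j > grid.length
  · rw [if_pos ⟨List.mem_range.mpr hj, hd⟩, if_pos hd]
  · rw [if_neg (by rintro ⟨_, h⟩; exact hd h), if_neg hd]

-- number of ones, per column, in A's final grid
theorem cnt_eq (grid : List (List Int)) (n j : Nat) (hj : j < n)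
    (hlen : ∀ row ∈ grid, n ≤ row.length) :
    grid.countP (fun row => decide
        ((if 2 * Zc (grid.map (rowFlipA n)) j > grid.length
          then pvFlip (effB row j) else effB row j) = 1))
      = if 2 * grid.countP (fun row => decide (effB row j = 0)) > grid.length
        then grid.countP (fun row => decide (effB row j = 0))
        else grid.countP (fun row => decide (effB row j = 1)) := by
  rw [Zc_g1 grid n j hj hlen]
  by_cases hd : 2 * grid.countP (fun row => decide (effB row j = 0)) > grid.length
  · rw [if_pos hd]
    apply List.countP_congr
    intro row _
    rw [if_pos hd]
    simp [pvFlip_eq_one]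
  · rw [if_neg hd]
    apply List.countP_congr
    intro row _
    rw [if_neg hd]

-- a List.count over a mapped list is a countP over the original list
theorem count_map_eq_countP (l : List (List Int)) (f : List Int → Int) (a : Int) :
    (l.map f).count a = l.countP (fun row => decide (f row = a)) := by
  induction l with
  | nil => simp
  | cons r l ih =>
    simp only [List.map_cons, List.count_cons, List.countP_cons, ih]
    by_cases h : f r = a
    · simp [h]
    · simp [h]

-- ===== VERDICT (by name: the statement is the Claim_ definition above) =====
theorem matrixScore_spec : Claim_equal_matrixScore := by
  intro grid _hdom hpre
  obtain ⟨hne, hn0, hrows⟩ := hpre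
  unfold Spec_matrixScore
  simp only [matrixScore, matrixScore_alt]
  have hlen : ∀ row ∈ grid, (grid.headD []).length ≤ row.length :=
    fun row hrow => le_of_eq (hrows row hrow).symm
  -- A as a column sum
  rw [phase2_foldl (List.range (grid.headD []).length)
    (grid.map (rowFlipA (grid.headD []).length)) List.nodup_range (by
      intro row hrow j hjr
      obtain ⟨row0, hrow0, rfl⟩ := List.mem_map.mp hrow
      rw [rowFlipA_length, hrows row0 hrow0]
      exact List.mem_range.mp hjr)]
  rw [List.map_map, foldl_add_eq_sum, zero_add, List.map_map]
  simp only [Function.comp_def]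
  have hmap : ∀ row ∈ grid,
      convertA ((rowFlipA (grid.headD []).length row).mapIdx (fun j v =>
        if j ∈ List.range (grid.headD []).length ∧
            2 * Zc (grid.map (rowFlipA (grid.headD []).length)) j
              > (grid.map (rowFlipA (grid.headD []).length)).length
        then pvFlip v else v))
      = ∑ j ∈ Finset.range (grid.headD []).length,
          (if (if 2 * Zc (grid.map (rowFlipA (grid.headD []).length)) j > grid.length
               then pvFlip (effB row j) else effB row j) = 1
           then (2:Int) ^ ((grid.headD []).length - 1 - j) else 0) := by
    intro row hrow
    have hL : ((rowFlipA (grid.headD []).length row).mapIdx (fun j v =>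
        if j ∈ List.range (grid.headD []).length ∧
            2 * Zc (grid.map (rowFlipA (grid.headD []).length)) j
              > (grid.map (rowFlipA (grid.headD []).length)).length
        then pvFlip v else v)).length = (grid.headD []).length := by
      rw [List.length_mapIdx, rowFlipA_length, hrows row hrow]
    rw [convertA_eq, hL]
    exact Finset.sum_congr rfl (fun j hj => by
      rw [final_getD grid row (grid.headD []).length j (hrows row hrow)
        (Finset.mem_range.mp hj)])
  rw [List.map_congr_left hmap, sum_map_sum]
  -- B as the same column sum
  rw [foldl_add_eq_sum, zero_add, List.range_eq_range', sum_map_range']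
  apply Finset.sum_congr rfl
  intro j hj
  have hj' : j < (grid.headD []).length := Finset.mem_range.mp hj
  simp only [Nat.zero_add]
  rw [sum_map_ite_count grid (fun row =>
    (if 2 * Zc (grid.map (rowFlipA (grid.headD []).length)) j > grid.length
     then pvFlip (effB row j) else effB row j) = 1)
    ((2:Int) ^ ((grid.headD []).length - 1 - j))]
  rw [cnt_eq grid (grid.headD []).length j hj' hlen]
  have he : (grid.map (fun row =>
      if row.getD 0 0 = 0 then (if row.getD j 0 = 0 then (1:Int) else 0) else row.getD j 0))
      = grid.map (fun row => effB row j) := rfl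
  rw [he, count_map_eq_countP, count_map_eq_countP]
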